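-- pv_equiv track=rewrite | github.com/Nischit-Ekbote/Inventory_managment | dataProcessing.py | validPAN
-- ===== SOURCE A (Python) =====
-- def validPAN(panNo : str) -> bool:
--     if not len(panNo) == 10:
--         return False
--
--     for i in range(10):
--         if i < 5 or i == 9:
--             if not (panNo[i] >= "A" and panNo[i] <= "Z"):
--                 return False
--         else:
--             if not(panNo[i] >= '0' and panNo[i] <= '9'):
--                 return False
--     return True
-- ===== SOURCE B (Python) =====
-- import re
--
-- _PAN_RE = re.compile(r'[A-Z]{5}[0-9]{4}[A-Z]')
--
-- def validPAN(panNo: str) -> bool: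
--     return _PAN_RE.fullmatch(panNo) is not None
-- ===== Notes on version B (the rewrite author's own statement) =====
-- stated objective: idiomatic
-- what changed: Replaced the indexed character-by-character loop with branch logic by a single precompiled regex fullmatch against [A-Z]{5}[0-9]{4}[A-Z].
import Mathlib
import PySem

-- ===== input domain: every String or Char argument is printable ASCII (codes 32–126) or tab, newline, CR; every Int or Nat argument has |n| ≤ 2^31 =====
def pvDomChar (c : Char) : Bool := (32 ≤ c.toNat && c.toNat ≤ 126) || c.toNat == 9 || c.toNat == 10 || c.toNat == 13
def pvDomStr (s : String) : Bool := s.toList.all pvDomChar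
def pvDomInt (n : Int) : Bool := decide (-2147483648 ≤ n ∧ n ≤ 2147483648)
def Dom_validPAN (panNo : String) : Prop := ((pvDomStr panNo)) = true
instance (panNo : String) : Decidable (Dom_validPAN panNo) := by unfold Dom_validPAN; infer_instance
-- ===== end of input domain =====

-- B replaces A's indexed loop with branches by a single regex-style pattern match
-- ([A-Z]{5}[0-9]{4}[A-Z]); equivalence of return values is proved on all ASCII strings.

-- ===== PORT A =====
-- the loop body: for i in range(10): branch on i, early return False
-- (Python's 1-char string comparisons "A" <= s[i] <= "Z" are char code-point comparisons)
def validPANLoop (s : List Char) : List Int → Bool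
  | [] => true
  | i :: rest =>
    if i < 5 ∨ i = 9 then
      match PySem.List.pyGet? s i with
      | none => false      -- unreachable: length checked before the loop
      | some c => if !(decide ('A' ≤ c) && decide (c ≤ 'Z')) then false else validPANLoop s rest
    else
      match PySem.List.pyGet? s i with
      | none => false
      | some c => if !(decide ('0' ≤ c) && decide (c ≤ '9')) then false else validPANLoop s rest

def validPAN (panNo : String) : Bool :=
  if !(PySem.Str.len panNo == 10) then false
  else validPANLoop panNo.toList (PySem.List.pyRange 0 10 1)

-- ===== PORT B =====
-- the compiled regex [A-Z]{5}[0-9]{4}[A-Z] as a list of character classes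
def panPattern : List (Char × Char) :=
  [('A','Z'),('A','Z'),('A','Z'),('A','Z'),('A','Z'),
   ('0','9'),('0','9'),('0','9'),('0','9'),('A','Z')]

-- fullmatch: the whole string must be consumed by the pattern
def matchClasses : List (Char × Char) → List Char → Bool
  | [], [] => true
  | (lo, hi) :: ps, c :: cs => decide (lo ≤ c) && decide (c ≤ hi) && matchClasses ps cs
  | _, _ => false

def validPAN_alt (panNo : String) : Bool :=
  matchClasses panPattern panNo.toList

-- ===== PRECONDITION & SPEC =====
def Spec_validPAN (panNo : String) (out : Bool) : Prop := out = validPAN_alt panNo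
instance (panNo : String) (out : Bool) : Decidable (Spec_validPAN panNo out) := by unfold Spec_validPAN; infer_instance

-- ===== CLAIM (what is proved, stated in full; the proofs are below) =====
def Claim_equal_validPAN : Prop := ∀ (panNo : String), Dom_validPAN panNo → Spec_validPAN panNo (validPAN panNo)

-- ===== LEMMAS AND PROOFS =====
theorem matchClasses_length_eq {ps : List (Char × Char)} {cs : List Char}
    (h : matchClasses ps cs = true) : ps.length = cs.length := by
  induction ps generalizing cs with
  | nil => cases cs with
    | nil => rfl
    | cons c cs => simp [matchClasses] at h
  | cons p ps ih =>
    obtain ⟨lo, hi⟩ := p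
    cases cs with
    | nil => simp [matchClasses] at h
    | cons c cs =>
      simp only [matchClasses, Bool.and_eq_true] at h
      simp [ih h.2]

-- ===== VERDICT (by name: the statement is the Claim_ definition above) =====
theorem validPAN_spec : Claim_equal_validPAN := by
  intro panNo _
  unfold Spec_validPAN validPAN validPAN_alt
  by_cases h : panNo.toList.length = 10
  · simp only [PySem.Str.len_eq, h]
    rcases hl : panNo.toList with _ | ⟨c0, _ | ⟨c1, _ | ⟨c2, _ | ⟨c3, _ | ⟨c4, _ | ⟨c5, _ | ⟨c6, _ | ⟨c7, _ | ⟨c8, _ | ⟨c9, _ | ⟨c10, rest⟩⟩⟩⟩⟩⟩⟩⟩⟩⟩⟩ <;>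
      simp_all [matchClasses, panPattern]
    have hr : PySem.List.pyRange 0 10 1 = [0,1,2,3,4,5,6,7,8,9] := by decide
    rw [hr]
    simp [validPANLoop, PySem.List.pyGet?, PySem.List.pyIdx?, Bool.and_assoc, ← decide_not, not_lt]
  · have hb : matchClasses panPattern panNo.toList = false := by
      cases hm : matchClasses panPattern panNo.toList with
      | false => rfl
      | true => exact absurd (matchClasses_length_eq hm) (by simpa [panPattern, eq_comm] using h)
    have h' : panNo.length ≠ 10 := by
      intro hc; exact h (by rw [String.length_toList]; exact hc)
    have h2 : (!(PySem.Str.len panNo == 10)) = true := by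
      simp [PySem.Str.len_eq]
      omega
    simp only [h2, if_true]
    exact hb.symm
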